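-- pv_equiv track=rewrite | github.com/cCoursey3/phishguard_independentStudy | PhishingDetection/files/Training_Files/Threat,Promise,PII/NER_For_Extraction/datasets/sentence_label.py | get_word_indices
-- ===== SOURCE A (Python) =====
-- def get_word_indices(text):
--     """Get start and end indices of each word in the text."""
--     words = text.split()
--     word_indices = []
--     start = 0
--     for word in words:
--         start = text.find(word, start)
--         end = start + len(word) - 1
--         word_indices.append((start, end))
--         start += len(word)
--     return word_indices
-- ===== SOURCE B (Python) =====
-- def get_word_indices(text):
--     """Get start and end indices of each word in the text."""
--     indices = []
--     start = 0
--     in_word = False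
--     for i, ch in enumerate(text):
--         if ch.isspace():
--             if in_word:
--                 indices.append((start, i - 1))
--                 in_word = False
--         else:
--             if not in_word:
--                 start = i
--                 in_word = True
--     if in_word:
--         indices.append((start, len(text) - 1))
--     return indices
-- ===== Notes on version B (the rewrite author's own statement) =====
-- stated objective: alternative
-- what changed: B replaces A's split() followed by a find() rescan of the text for every word with a single stateful left-to-right pass over the characters that tracks word starts with an in_word flag.
import Mathlib
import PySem

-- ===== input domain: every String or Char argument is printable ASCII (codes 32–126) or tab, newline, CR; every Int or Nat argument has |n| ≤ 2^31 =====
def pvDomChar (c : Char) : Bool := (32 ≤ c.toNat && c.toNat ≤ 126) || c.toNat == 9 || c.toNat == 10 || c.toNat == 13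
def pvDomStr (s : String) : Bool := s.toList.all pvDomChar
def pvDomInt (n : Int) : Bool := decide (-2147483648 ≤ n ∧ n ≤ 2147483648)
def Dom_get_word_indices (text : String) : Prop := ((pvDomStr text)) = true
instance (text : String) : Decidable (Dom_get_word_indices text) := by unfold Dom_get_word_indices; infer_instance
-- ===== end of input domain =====

-- B replaces A's split() plus per-word find() rescans by a single stateful pass over the characters (objective: alternative).

-- ===== PORT A =====
def get_word_indices (text : String) : List (Int × Int) :=
  let words := PySem.Str.split₀ text
  (words.foldl
    (fun (st : List (Int × Int) × Int) word =>
      let start := PySem.Str.findFrom text word st.2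
      let en := start + (PySem.Str.len word : Int) - 1
      (st.1 ++ [(start, en)], start + (PySem.Str.len word : Int)))
    ([], 0)).1

-- ===== PORT B =====
def get_word_indices_alt (text : String) : List (Int × Int) :=
  let r := (PySem.List.enumerate text.toList 0).foldl
    (fun (st : List (Int × Int) × Int × Bool) ic =>
      if PySem.Chars.isspace ic.2 then
        (if st.2.2 then (st.1 ++ [(st.2.1, ic.1 - 1)], st.2.1, false) else st)
      else
        (if st.2.2 then st else (st.1, ic.1, true)))
    ([], 0, false)
  if r.2.2 then r.1 ++ [(r.2.1, (PySem.Str.len text : Int) - 1)] else r.1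

-- ===== PRECONDITION & SPEC =====
def Spec_get_word_indices (text : String) (out : List (Int × Int)) : Prop := out = get_word_indices_alt text
instance (text : String) (out : List (Int × Int)) : Decidable (Spec_get_word_indices text out) := by unfold Spec_get_word_indices; infer_instance

-- ===== CLAIM (what is proved, stated in full; the proofs are below) =====
def Claim_equal_get_word_indices : Prop := ∀ (text : String), Dom_get_word_indices text → Spec_get_word_indices text (get_word_indices text)

-- ===== LEMMAS AND PROOFS =====

mutual
def pvWscan : List Char → Int → List (Int × Int)
  | [], _ => []
  | c :: cs, i => if PySem.Chars.isspace c then pvWscan cs (i+1) else pvInword cs i (i+1)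
def pvInword : List Char → Int → Int → List (Int × Int)
  | [], st, i => [(st, i - 1)]
  | c :: cs, st, i => if PySem.Chars.isspace c then (st, i - 1) :: pvWscan cs (i+1) else pvInword cs st (i+1)
end

lemma pvInword_eq (cs : List Char) : ∀ (st i : Int),
    pvInword cs st i =
      (st, i + ((cs.takeWhile (fun d => !PySem.Chars.isspace d)).length : Int) - 1) ::
        pvWscan (cs.dropWhile (fun d => !PySem.Chars.isspace d))
          (i + ((cs.takeWhile (fun d => !PySem.Chars.isspace d)).length : Int)) := by
  induction cs with
  | nil => intro st i; simp [pvInword, pvWscan]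
  | cons c rest ih =>
    intro st i
    by_cases hc : PySem.Chars.isspace c
    · simp [pvInword, pvWscan, List.takeWhile, List.dropWhile, hc]
    · simp only [pvInword, hc, List.takeWhile, List.dropWhile, Bool.not_false,
        List.length_cons]
      rw [ih st (i + 1)]
      push_cast
      ring_nf

lemma pvFindGo (w : List Char) (c : Char) (hw : w.head? = some c) (hc : ¬ PySem.Chars.isspace c) :
    ∀ (m : List Char) (rest : List Char) (q : Nat), (∀ x ∈ m, PySem.Chars.isspace x) →
      w.isPrefixOf rest → PySem.Chars.find.go w (m ++ rest) q = (q : Int) + m.length := by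
  obtain ⟨c, w', rfl⟩ : ∃ a l, w = a :: l := by
    cases w with
    | nil => simp at hw
    | cons a l => exact ⟨a, l, rfl⟩
  rw [List.head?_cons, Option.some_inj] at hw
  subst hw
  intro m
  induction m with
  | nil =>
    intro rest q hm hp
    cases rest with
    | nil => simp [List.isPrefixOf] at hp
    | cons r rs =>
      simp only [List.nil_append, PySem.Chars.find.go, hp, if_true]
      simp
  | cons x m' ih =>
    intro rest q hm hp
    have hx : PySem.Chars.isspace x := hm x (by simp)
    have hcx : (c == x) = false := by
      by_cases h : c = x
      · exact absurd (h ▸ hx) hc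
      · simp [h]
    simp only [List.cons_append, PySem.Chars.find.go, List.isPrefixOf_cons₂, hcx,
      Bool.false_and]
    rw [ih rest (q + 1) (fun y hy => hm y (by simp [hy])) hp]
    push_cast [List.length_cons]
    ring

lemma pvFindFrom (t w : List Char) (s k : Nat) (c : Char)
    (hs : s ≤ k) (hkt : k ≤ t.length)
    (hw : w.head? = some c) (hc : ¬ PySem.Chars.isspace c)
    (hpre : w <+: t.drop k)
    (hws : ∀ j : Nat, s ≤ j → j < k → ∀ h : j < t.length, PySem.Chars.isspace t[j]) :
    PySem.Chars.findFrom t w (s : Int) none = (k : Int) := by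
  have hdecomp : t.drop s = (t.drop s).take (k - s) ++ t.drop k := by
    conv_lhs => rw [← List.take_append_drop (k - s) (t.drop s)]
    rw [List.drop_drop]
    congr 2
    omega
  have hlen : ((t.drop s).take (k - s)).length = k - s := by
    simp only [List.length_take, List.length_drop]
    omega
  have hm : ∀ x ∈ (t.drop s).take (k - s), PySem.Chars.isspace x := by
    intro x hx
    rw [List.mem_iff_getElem] at hx
    obtain ⟨i, hi, rfl⟩ := hx
    rw [hlen] at hi
    rw [List.getElem_take, List.getElem_drop]
    exact hws (s + i) (by omega) (by omega) (by omega)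
  have hfg : PySem.Chars.find.go w (t.drop s) 0 = ((k - s : Nat) : Int) := by
    rw [hdecomp, pvFindGo w c hw hc _ _ 0 hm (List.isPrefixOf_iff_prefix.mpr hpre), hlen]
    simp
  simp only [PySem.Chars.findFrom, PySem.Chars.find]
  have h0 : ¬ ((s : Int) < 0) := by omega
  simp only [h0, if_false]
  have : ¬ ((t.length : Int) < (s : Int)) := by omega
  rw [if_neg this]
  have ht : List.take (Int.toNat (t.length : Int)) t = t := by
    simp
  have hst : (Int.toNat ((s : Int))) = s := by simp
  rw [hst, ht, hfg]
  have hne : ¬ (((k - s : Nat) : Int) = -1) := by omega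
  rw [if_neg hne]
  omega

def pvBstep (st : List (Int × Int) × Int × Bool) (ic : Int × Char) : List (Int × Int) × Int × Bool :=
  if PySem.Chars.isspace ic.2 then
    (if st.2.2 then (st.1 ++ [(st.2.1, ic.1 - 1)], st.2.1, false) else st)
  else
    (if st.2.2 then st else (st.1, ic.1, true))

def pvBrun (t cs : List Char) (i : Int) (s : List (Int × Int) × Int × Bool) : List (Int × Int) :=
  let r := (PySem.List.enumerate cs i).foldl pvBstep s
  if r.2.2 then r.1 ++ [(r.2.1, (t.length : Int) - 1)] else r.1

lemma pvBrun_cons (t : List Char) (c : Char) (cs : List Char) (i : Int) (s : List (Int × Int) × Int × Bool) :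
    pvBrun t (c :: cs) i s = pvBrun t cs (i + 1) (pvBstep s (i, c)) := by
  simp [pvBrun, PySem.List.enumerate]

lemma pvBmain (t : List Char) : ∀ (cs : List Char) (i : Nat) (out : List (Int × Int)) (st : Int) (inw : Bool),
    i + cs.length = t.length →
    pvBrun t cs (i : Int) (out, st, inw)
      = out ++ (if inw then pvInword cs st (i : Int) else pvWscan cs (i : Int)) := by
  intro cs
  induction cs with
  | nil =>
    intro i out st inw hlen
    have hi : i = t.length := by simpa using hlen
    simp only [pvBrun, PySem.List.enumerate, List.foldl_nil]
    cases inw with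
    | false => simp [pvWscan]
    | true =>
      have : (t.length : Int) - 1 = (i : Int) - 1 := by omega
      simp [pvInword, this]
  | cons c cs' ih =>
    intro i out st inw hlen
    have hlen' : i + 1 + cs'.length = t.length := by simp at hlen; omega
    have hpush : (i : Int) + 1 = ((i + 1 : Nat) : Int) := by push_cast; ring
    rw [pvBrun_cons]
    by_cases hc : PySem.Chars.isspace c <;> cases inw
    · -- ws, not in word
      have hstep : pvBstep (out, st, false) ((i : Int), c) = (out, st, false) := by
        simp [pvBstep, hc]
      rw [hstep, hpush, ih (i + 1) out st false hlen']
      simp [pvWscan, hc, ← hpush]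
    · -- ws, in word
      have hstep : pvBstep (out, st, true) ((i : Int), c) = (out ++ [(st, (i : Int) - 1)], st, false) := by
        simp [pvBstep, hc]
      rw [hstep, hpush, ih (i + 1) (out ++ [(st, (i : Int) - 1)]) st false hlen']
      simp [pvInword, hc, ← hpush]
    · -- non-ws, not in word
      have hstep : pvBstep (out, st, false) ((i : Int), c) = (out, (i : Int), true) := by
        simp [pvBstep, hc]
      rw [hstep, hpush, ih (i + 1) out (i : Int) true hlen']
      simp [pvWscan, hc, ← hpush]
    · -- non-ws, in word
      have hstep : pvBstep (out, st, true) ((i : Int), c) = (out, st, true) := by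
        simp [pvBstep, hc]
      rw [hstep, hpush, ih (i + 1) out st true hlen']
      simp [pvInword, hc, ← hpush]


lemma pvSplit_acc (cs : List Char) : ∀ (cur : List Char) (acc : List (List Char)),
    PySem.Chars.split₀.go cs cur acc = acc.reverse ++ PySem.Chars.split₀.go cs cur [] := by
  induction cs with
  | nil => intro cur acc; simp [PySem.Chars.split₀.go]; split <;> simp
  | cons c rest ih =>
    intro cur acc
    simp only [PySem.Chars.split₀.go]
    split
    · split
      · exact ih [] acc
      · rw [ih [] (cur.reverse :: acc), ih [] [cur.reverse]]; simp
    · exact ih (c :: cur) acc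

lemma pvSplit_word (cs : List Char) : ∀ (cur : List Char), cur ≠ [] →
    PySem.Chars.split₀.go cs cur [] =
      (cur.reverse ++ cs.takeWhile (fun d => !PySem.Chars.isspace d)) ::
        PySem.Chars.split₀ (cs.dropWhile (fun d => !PySem.Chars.isspace d)) := by
  induction cs with
  | nil => intro cur h; simp [PySem.Chars.split₀.go, PySem.Chars.split₀, h]
  | cons c rest ih =>
    intro cur h
    simp only [PySem.Chars.split₀.go]
    by_cases hc : PySem.Chars.isspace c
    · simp only [hc, if_true, List.isEmpty_iff, h, List.takeWhile, List.dropWhile,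
        Bool.not_true, if_false]
      rw [pvSplit_acc]
      simp [PySem.Chars.split₀]
      simp [PySem.Chars.split₀.go, hc]
    · simp only [hc, List.takeWhile, List.dropWhile, Bool.not_false]
      rw [ih (c :: cur) (by simp)]
      simp

lemma pvSplit_ws (c : Char) (cs : List Char) (h : PySem.Chars.isspace c) :
    PySem.Chars.split₀ (c :: cs) = PySem.Chars.split₀ cs := by
  simp [PySem.Chars.split₀, PySem.Chars.split₀.go, h]

lemma pvSplit_cons (c : Char) (cs : List Char) (h : ¬ PySem.Chars.isspace c) :
    PySem.Chars.split₀ (c :: cs) =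
      ((c :: cs).takeWhile (fun d => !PySem.Chars.isspace d)) ::
        PySem.Chars.split₀ ((c :: cs).dropWhile (fun d => !PySem.Chars.isspace d)) := by
  rw [PySem.Chars.split₀]
  simp only [PySem.Chars.split₀.go, h]
  rw [pvSplit_word cs [c] (by simp)]
  simp [List.takeWhile, List.dropWhile, h]

def pvAstep (t : List Char) (st : List (Int × Int) × Int) (w : List Char) : List (Int × Int) × Int :=
  let p := PySem.Chars.findFrom t w st.2
  (st.1 ++ [(p, p + (w.length : Int) - 1)], p + (w.length : Int))

lemma pvAmain (t : List Char) : ∀ (n : Nat) (cs : List Char) (s k : Nat) (acc : List (Int × Int)),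
    cs.length ≤ n → s ≤ k → k ≤ t.length → t.drop k = cs →
    (∀ j : Nat, s ≤ j → j < k → ∀ h : j < t.length, PySem.Chars.isspace t[j]) →
    ∃ s' : Int,
      (PySem.Chars.split₀ cs).foldl (pvAstep t) (acc, (s : Int))
        = (acc ++ pvWscan cs (k : Int), s') := by
  intro n
  induction n with
  | zero =>
    intro cs s k acc hn _ _ _ _
    have : cs = [] := List.eq_nil_of_length_eq_zero (by omega)
    subst this
    exact ⟨(s : Int), by simp [PySem.Chars.split₀, PySem.Chars.split₀.go, pvWscan]⟩
  | succ n ih =>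
    intro cs s k acc hn hs hkt hdrop hws
    cases cs with
    | nil => exact ⟨(s : Int), by simp [PySem.Chars.split₀, PySem.Chars.split₀.go, pvWscan]⟩
    | cons c cs' =>
      have hklt : k < t.length := by
        have := congrArg List.length hdrop
        simp [List.length_drop] at this
        omega
      by_cases hc : PySem.Chars.isspace c
      · -- skip one whitespace char
        rw [pvSplit_ws c cs' hc]
        have hdrop' : t.drop (k + 1) = cs' := by
          have : t.drop (k + 1) = (t.drop k).drop 1 := by rw [List.drop_drop]
          rw [this, hdrop]
          simp
        have htk : PySem.Chars.isspace t[k] := by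
          have h0 : t[k] = (t.drop k)[0]'(by simp [hdrop]) := by
            simp [List.getElem_drop]
          rw [h0]
          simp [hdrop, hc]
        obtain ⟨s', hrec⟩ := ih cs' s (k + 1) acc (by simp at hn; omega) (by omega) (by omega) hdrop'
          (by
            intro j hj1 hj2 hjt
            by_cases hjk : j = k
            · subst hjk; exact htk
            · exact hws j hj1 (by omega) hjt)
        refine ⟨s', ?_⟩
        rw [hrec]
        have : pvWscan (c :: cs') (k : Int) = pvWscan cs' ((k : Int) + 1) := by
          simp [pvWscan, hc]
        rw [this]
        norm_num
      · -- a word starts at position k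
        rw [pvSplit_cons c cs' hc]
        have hwne : (c :: cs').takeWhile (fun d => !PySem.Chars.isspace d) =
            c :: cs'.takeWhile (fun d => !PySem.Chars.isspace d) := by
          simp [List.takeWhile, hc]
        have hdne : (c :: cs').dropWhile (fun d => !PySem.Chars.isspace d) =
            cs'.dropWhile (fun d => !PySem.Chars.isspace d) := by
          simp [List.dropWhile, hc]
        set w := (c :: cs').takeWhile (fun d => !PySem.Chars.isspace d) with hw
        set rest := (c :: cs').dropWhile (fun d => !PySem.Chars.isspace d) with hrest
        have hsplit : w ++ rest = c :: cs' := List.takeWhile_append_dropWhile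
        have hlens : w.length + rest.length = cs'.length + 1 := by
          have := congrArg List.length hsplit
          simpa using this
        have hw1 : 1 ≤ w.length := by rw [hwne]; simp
        have hcslen : cs'.length + 1 = t.length - k := by
          have := congrArg List.length hdrop
          simp [List.length_drop] at this
          omega
        have hkw : k + w.length ≤ t.length := by omega
        have hfind : PySem.Chars.findFrom t w (s : Int) none = (k : Int) := by
          refine pvFindFrom t w s k c hs (by omega) (by simp [hwne]) hc ?_ hws
          rw [hdrop, ← hsplit]
          exact List.prefix_append w rest
        have hcast : ((k + w.length : Nat) : Int) = (k : Int) + (w.length : Int) := by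
          push_cast; ring
        have hstep : pvAstep t (acc, (s : Int)) w
            = (acc ++ [((k : Int), ((k + w.length : Nat) : Int) - 1)], ((k + w.length : Nat) : Int)) := by
          rw [hcast]
          simp [pvAstep, hfind]
        have hdrop2 : t.drop (k + w.length) = rest := by
          have h1 : (t.drop k).drop w.length = rest := by
            rw [hdrop, ← hsplit]; simp
          rw [← h1, List.drop_drop]
        have hrlen : rest.length ≤ n := by
          simp at hn
          omega
        obtain ⟨s', hrec⟩ := ih rest (k + w.length) (k + w.length)
          (acc ++ [((k : Int), ((k + w.length : Nat) : Int) - 1)]) hrlen (by omega)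
          hkw hdrop2 (by intro j h1 h2; omega)
        refine ⟨s', ?_⟩
        rw [List.foldl_cons, hstep, hrec]
        have hscan : pvWscan (c :: cs') (k : Int)
            = ((k : Int), ((k + w.length : Nat) : Int) - 1) ::
                pvWscan rest ((k + w.length : Nat) : Int) := by
          have h1 : pvWscan (c :: cs') (k : Int) = pvInword cs' (k : Int) ((k : Int) + 1) := by
            simp [pvWscan, hc]
          rw [h1, pvInword_eq]
          have h2 : (k : Int) + 1 + ((cs'.takeWhile (fun d => !PySem.Chars.isspace d)).length : Int)
              = ((k + w.length : Nat) : Int) := by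
            rw [hcast, hwne]
            push_cast [List.length_cons]
            ring
          rw [h2, ← hdne]
        rw [hscan]
        simp

lemma pvA_eq (text : String) : get_word_indices text = pvWscan text.toList 0 := by
  obtain ⟨s', h⟩ := pvAmain text.toList text.toList.length text.toList 0 0 []
    le_rfl le_rfl (by simp) (by simp) (by intro j h1 h2; omega)
  unfold get_word_indices
  simp only [PySem.Str.split₀, List.foldl_map, PySem.Str.findFrom, PySem.Str.len,
    String.toList_ofList]
  have h' := congrArg Prod.fst h
  simp only [Nat.cast_zero, List.nil_append] at h'
  exact h'

lemma pvB_eq (text : String) : get_word_indices_alt text = pvWscan text.toList 0 := by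
  unfold get_word_indices_alt
  have h := pvBmain text.toList text.toList 0 [] 0 false (by simp)
  simp only [Nat.cast_zero] at h
  have hfold : (PySem.List.enumerate text.toList 0).foldl
      (fun (st : List (Int × Int) × Int × Bool) ic =>
        if PySem.Chars.isspace ic.2 then
          (if st.2.2 then (st.1 ++ [(st.2.1, ic.1 - 1)], st.2.1, false) else st)
        else
          (if st.2.2 then st else (st.1, ic.1, true)))
      ([], 0, false)
    = (PySem.List.enumerate text.toList 0).foldl pvBstep ([], 0, false) := rfl
  rw [hfold]
  have : PySem.Str.len text = (text.toList.length : Int) := rfl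
  rw [this]
  simpa [pvBrun] using h

-- ===== VERDICT (by name: the statement is the Claim_ definition above) =====
theorem get_word_indices_spec : Claim_equal_get_word_indices := by
  intro text _
  unfold Spec_get_word_indices
  rw [pvA_eq, pvB_eq]
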